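-- pv_equiv track=rewrite | github.com/mlearnprojects/daily-programmer | 336_easy/python_solution_2_with_ext_1/main.py | how_many_clones
-- ===== SOURCE A (Python) =====
-- def how_many_clones(number, sorted_numbers):
--     # Don't use count() method because its complexity is O(n).
--     # We use this method of finding occurences because we already know that list is sorted.
--
--     number_of_clones = 0
--     i = -1
--     while True:
--         try:
--             x = sorted_numbers[i]
--         except IndexError:
--             break
--         else:
--             if x == number:
--                 number_of_clones += 1
--                 i -= 1
--             else:
--                 break
--
--     return number_of_clones
-- ===== SOURCE B (Python) =====
-- def how_many_clones(number, sorted_numbers):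
--     # Single forward pass with a resettable counter: the counter is reset on
--     # every mismatch, so at the end it holds the length of the final
--     # contiguous run of `number` - exactly A's backward trailing count.
--     count = 0
--     for x in sorted_numbers:
--         if x == number:
--             count += 1
--         else:
--             count = 0
--     return count
-- ===== Notes on version B (the rewrite author's own statement) =====
-- stated objective: simpler
-- what changed: Replaced A's backward while-loop over negative indices with try/except IndexError by a single forward scan maintaining a counter that resets on every mismatch.
import Mathlib
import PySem

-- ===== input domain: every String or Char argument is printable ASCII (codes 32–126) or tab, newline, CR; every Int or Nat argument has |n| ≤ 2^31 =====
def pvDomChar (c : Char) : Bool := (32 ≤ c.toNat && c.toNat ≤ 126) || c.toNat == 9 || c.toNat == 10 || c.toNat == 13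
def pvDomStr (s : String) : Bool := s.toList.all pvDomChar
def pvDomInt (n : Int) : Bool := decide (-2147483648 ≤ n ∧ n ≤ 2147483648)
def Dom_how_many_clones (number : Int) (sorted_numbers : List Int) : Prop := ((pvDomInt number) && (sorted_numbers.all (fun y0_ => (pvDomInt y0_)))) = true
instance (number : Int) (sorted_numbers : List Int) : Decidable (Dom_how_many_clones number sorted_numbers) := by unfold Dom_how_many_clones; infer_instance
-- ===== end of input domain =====

-- B replaces A's backward negative-index while-loop by a forward scan with a
-- counter that resets on every mismatch (objective: simpler).

-- ===== PORT A =====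
-- A's `while True` loop: index i starts at -1 and decreases; IndexError (pyGet? = none)
-- or a mismatch breaks the loop. Fuel `xs.length + 1` suffices since each step moves
-- one position further from the end.
def howLoopA (n : Int) (xs : List Int) : Nat → Int → Int → Int
  | 0, _, acc => acc
  | fuel+1, i, acc =>
    match PySem.List.pyGet? xs i with
    | none => acc
    | some x => if x = n then howLoopA n xs fuel (i - 1) (acc + 1) else acc

def how_many_clones (number : Int) (sorted_numbers : List Int) : Int :=
  howLoopA number sorted_numbers (sorted_numbers.length + 1) (-1) 0

-- ===== PORT B =====
def how_many_clones_alt (number : Int) (sorted_numbers : List Int) : Int :=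
  sorted_numbers.foldl (fun c x => if x = number then c + 1 else 0) 0

-- ===== PRECONDITION & SPEC =====
def Spec_how_many_clones (number : Int) (sorted_numbers : List Int) (out : Int) : Prop := out = how_many_clones_alt number sorted_numbers
instance (number : Int) (sorted_numbers : List Int) (out : Int) : Decidable (Spec_how_many_clones number sorted_numbers out) := by unfold Spec_how_many_clones; infer_instance

-- ===== CLAIM (what is proved, stated in full; the proofs are below) =====
def Claim_equal_how_many_clones : Prop := ∀ (number : Int) (sorted_numbers : List Int), Dom_how_many_clones number sorted_numbers → Spec_how_many_clones number sorted_numbers (how_many_clones number sorted_numbers)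

-- ===== LEMMAS AND PROOFS =====

-- Length of the longest prefix of `l` consisting of elements equal to `n`.
def trailRun (n : Int) : List Int → Int
  | [] => 0
  | x :: r => if x = n then trailRun n r + 1 else 0

theorem alt_eq_trail (n : Int) (xs : List Int) :
    how_many_clones_alt n xs = trailRun n xs.reverse := by
  unfold how_many_clones_alt
  induction xs using List.reverseRecOn with
  | nil => simp [trailRun]
  | append_singleton ys y ih =>
    rw [List.foldl_append, List.reverse_append]
    simp only [List.foldl_cons, List.foldl_nil, List.reverse_cons, List.reverse_nil,
      List.nil_append, List.cons_append, trailRun]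
    by_cases h : y = n <;> simp [h, ih]

theorem howLoopA_eq (n : Int) (xs : List Int) :
    ∀ fuel k acc, k ≤ xs.length → fuel = xs.length + 1 - k →
      howLoopA n xs fuel (-((k : Int) + 1)) acc = acc + trailRun n (xs.reverse.drop k) := by
  intro fuel
  induction fuel with
  | zero => intro k acc hk hf; omega
  | succ m ih =>
    intro k acc hk hf
    by_cases hlt : k < xs.length
    · have hlen : k < xs.reverse.length := by simpa using hlt
      have hget : PySem.List.pyGet? xs (-((k : Int) + 1)) = some (xs.reverse[k]'hlen) := by
        have h1 : (-((k : Int) + 1)) = -(((k + 1 : Nat) : Int)) := by push_cast; ring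
        rw [h1, PySem.List.pyGet?_neg_natCast xs (k + 1) (by omega) (by omega)]
        have h2 : xs.length - (k + 1) = xs.length - 1 - k := by omega
        rw [h2, ← List.getElem?_reverse hlt, List.getElem?_eq_getElem hlen]
      have hdrop : List.drop k xs.reverse = xs.reverse[k]'hlen :: List.drop (k + 1) xs.reverse :=
        (List.getElem_cons_drop hlen).symm
      unfold howLoopA
      rw [hget]
      dsimp only
      by_cases hx : xs.reverse[k]'hlen = n
      · rw [if_pos hx]
        have harg : (-((k : Int) + 1)) - 1 = -(((k + 1 : Nat) : Int) + 1) := by push_cast; ring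
        rw [harg, ih (k + 1) (acc + 1) (by omega) (by omega), hdrop]
        simp only [trailRun, if_pos hx]
        ring
      · rw [if_neg hx, hdrop]
        simp only [trailRun, if_neg hx]
        ring
    · have hk' : k = xs.length := by omega
      have hget : PySem.List.pyGet? xs (-((k : Int) + 1)) = none := by
        rw [PySem.List.pyGet?_eq_none_iff]
        simp only [PySem.Raise.InRange, not_and, not_lt]
        intro h
        omega
      unfold howLoopA
      rw [hget]
      have hnil : List.drop k xs.reverse = [] := List.drop_eq_nil_of_le (by simp [hk'])
      simp [hnil, trailRun]

-- ===== VERDICT (by name: the statement is the Claim_ definition above) =====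
theorem how_many_clones_spec : Claim_equal_how_many_clones := by
  intro n xs _
  unfold Spec_how_many_clones how_many_clones
  have h := howLoopA_eq n xs (xs.length + 1) 0 0 (by omega) (by omega)
  simpa [alt_eq_trail] using h
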